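-- pv_equiv track=rewrite | github.com/lenadank/megilot | megilot/searchUtils.py | group_by_first_string_raw
-- ===== SOURCE A (Python) =====
-- def group_by_first_string_raw(spans_indices_results):
--     '''Group result from search_rec_raw according to first string. All results starting with the same index are grouped in a list.
--     Return a list of lists with deques.
--     '''
--
--     cur_start = spans_indices_results[0][0]
--     i = 0
--     res = []
--     cur_parag = []
--     while i < len(spans_indices_results):
--         next_result = spans_indices_results[i]
--         next_start = next_result[0]
--         if cur_start != next_start:
--             res.append(cur_parag)
--             cur_parag = []
--             cur_start = next_start
--         cur_parag.append(next_result)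
--         i += 1
--     res.append(cur_parag)
--     return res
-- ===== SOURCE B (Python) =====
-- def group_by_first_string_raw(spans_indices_results):
--     '''Group result from search_rec_raw according to first string. All results starting
--     with the same index are grouped in a list. Recursive run-splitting: split off the
--     leading run of equal first-indices, recurse on the remainder.'''
--
--     def split_run(xs, key):
--         if xs and xs[0][0] == key:
--             run, rest = split_run(xs[1:], key)
--             return [xs[0]] + run, rest
--         return [], xs
--
--     def go(xs):
--         if not xs:
--             return []
--         run, rest = split_run(xs[1:], xs[0][0])
--         return [[xs[0]] + run] + go(rest)
--
--     return go(spans_indices_results)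
-- ===== Notes on version B (the rewrite author's own statement) =====
-- stated objective: alternative
-- what changed: Replaces A's indexed while-loop with cur_start/cur_parag flush-on-key-change state by a purely recursive decomposition: a recursive split_run peels off the leading run of equal first-indices and go recurses on the remainder, maintaining no mutable state; Pre_ excludes only the empty list, on which A raises IndexError (B returns []).
import Mathlib
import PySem

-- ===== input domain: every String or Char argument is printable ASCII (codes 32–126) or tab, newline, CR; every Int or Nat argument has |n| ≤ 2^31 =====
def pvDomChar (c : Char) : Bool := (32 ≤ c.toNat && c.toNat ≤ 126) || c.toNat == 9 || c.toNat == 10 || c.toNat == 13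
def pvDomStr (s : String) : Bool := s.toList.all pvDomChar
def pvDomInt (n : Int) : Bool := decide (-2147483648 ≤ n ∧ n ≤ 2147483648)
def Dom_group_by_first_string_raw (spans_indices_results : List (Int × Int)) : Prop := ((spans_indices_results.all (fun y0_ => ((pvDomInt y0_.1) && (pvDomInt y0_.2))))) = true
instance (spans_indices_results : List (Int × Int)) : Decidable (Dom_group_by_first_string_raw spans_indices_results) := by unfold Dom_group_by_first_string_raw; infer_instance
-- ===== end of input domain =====

-- B replaces A's indexed loop with flush-on-key-change state by recursive run-splitting
-- (peel off the leading run of equal first-indices, recurse on the rest); return-value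
-- equivalence on nonempty input (A raises IndexError on [], where B returns []).

-- ===== PORT A =====
def stepA (acc : List (List (Int × Int)) × List (Int × Int) × Int) (nr : Int × Int) :
    List (List (Int × Int)) × List (Int × Int) × Int :=
  let (res, cur_parag, cur_start) := acc
  if cur_start ≠ nr.1 then (res ++ [cur_parag], [nr], nr.1)
  else (res, cur_parag ++ [nr], cur_start)

def group_by_first_string_raw (spans_indices_results : List (Int × Int)) : List (List (Int × Int)) :=
  match PySem.List.pyGet? spans_indices_results 0 with
  | none => []  -- IndexError in Python; excluded by Pre_
  | some first =>
    let st := spans_indices_results.foldl stepA ([], [], first.1)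
    st.1 ++ [st.2.1]

-- ===== PORT B =====
-- split_run xs key = (leading run of elements whose first component equals key, remainder)
def split_run (xs : List (Int × Int)) (key : Int) : List (Int × Int) × List (Int × Int) :=
  match xs with
  | x :: t =>
    if x.1 == key then
      let (run, rest) := split_run t key
      (x :: run, rest)
    else ([], x :: t)
  | [] => ([], [])

-- the remainder never grows (cited by goB's decreasing_by)
lemma split_run_len (xs : List (Int × Int)) (key : Int) :
    (split_run xs key).2.length ≤ xs.length := by
  induction xs with
  | nil => simp [split_run]
  | cons x t ih =>
    simp only [split_run]
    split
    · simpa using le_trans ih (Nat.le_succ _)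
    · simp

def goB (xs : List (Int × Int)) : List (List (Int × Int)) :=
  match xs with
  | [] => []
  | x :: t => (x :: (split_run t x.1).1) :: goB (split_run t x.1).2
termination_by xs.length
decreasing_by
  exact Nat.lt_succ_of_le (split_run_len t x.1)

def group_by_first_string_raw_alt (spans_indices_results : List (Int × Int)) : List (List (Int × Int)) :=
  goB spans_indices_results

-- ===== PRECONDITION & SPEC =====
-- Pre_ excludes only the empty list, on which A raises IndexError.
def Pre_group_by_first_string_raw (spans_indices_results : List (Int × Int)) : Prop :=
  spans_indices_results ≠ []
instance (spans_indices_results : List (Int × Int)) : Decidable (Pre_group_by_first_string_raw spans_indices_results) := by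
  unfold Pre_group_by_first_string_raw; infer_instance

def pvWitness_group_by_first_string_raw : (List (Int × Int)) := [(1, 2), (1, 3), (2, 4)]

def Spec_group_by_first_string_raw (spans_indices_results : List (Int × Int)) (out : List (List (Int × Int))) : Prop := out = group_by_first_string_raw_alt spans_indices_results
instance (spans_indices_results : List (Int × Int)) (out : List (List (Int × Int))) : Decidable (Spec_group_by_first_string_raw spans_indices_results out) := by unfold Spec_group_by_first_string_raw; infer_instance

-- ===== CLAIM (what is proved, stated in full; the proofs are below) =====
def Claim_equal_group_by_first_string_raw : Prop := ∀ (spans_indices_results : List (Int × Int)), Dom_group_by_first_string_raw spans_indices_results → Pre_group_by_first_string_raw spans_indices_results → Spec_group_by_first_string_raw spans_indices_results (group_by_first_string_raw spans_indices_results)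

-- ===== LEMMAS AND PROOFS =====

-- Invariant: A's fold from state (res, cur, cs) produces res, then cur extended by the
-- run of key cs, then B's grouping of the remainder.
lemma fold_inv : ∀ (xs : List (Int × Int)) (res : List (List (Int × Int)))
    (cur : List (Int × Int)) (cs : Int),
    (xs.foldl stepA (res, cur, cs)).1 ++ [(xs.foldl stepA (res, cur, cs)).2.1]
      = res ++ (cur ++ (split_run xs cs).1) :: goB (split_run xs cs).2 := by
  intro xs
  induction xs with
  | nil => intro res cur cs; simp [split_run, goB]
  | cons x t ih =>
    intro res cur cs
    by_cases hk : x.1 = cs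
    · have hA : stepA (res, cur, cs) x = (res, cur ++ [x], cs) := by
        simp [stepA, hk]
      simp only [List.foldl_cons, hA, ih, split_run, hk]
      simp
    · have hA : stepA (res, cur, cs) x = (res ++ [cur], [x], x.1) := by
        simp [stepA]; intro h; exact absurd h.symm hk
      have hs : split_run (x :: t) cs = ([], x :: t) := by
        simp [split_run, hk]
      simp only [List.foldl_cons, hA, ih, hs, goB]
      simp

-- ===== VERDICT (by name: the statement is the Claim_ definition above) =====
theorem group_by_first_string_raw_spec : Claim_equal_group_by_first_string_raw := by
  intro s _ hpre
  unfold Spec_group_by_first_string_raw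
  cases s with
  | nil => exact absurd rfl hpre
  | cons x t =>
    symm
    unfold group_by_first_string_raw group_by_first_string_raw_alt
    simp only [PySem.List.pyGet?, PySem.List.pyIdx?]
    norm_num
    have hA : stepA ([], [], x.1) x = ([], [x], x.1) := by simp [stepA]
    rw [hA, fold_inv t [] [x] x.1]
    simp [goB]
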